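-- pv_equiv track=rewrite | github.com/MirunaPislar/Sarcasm-Detection | src/split_hashtags.py | split_hashtag_to_words_all_possibilities
-- ===== SOURCE A (Python) =====
-- def split_hashtag_to_words_all_possibilities(hashtag, word_dictionary):
--     all_possibilities = []
--
--     split_possibility = [hashtag[:i] in word_dictionary for i in reversed(range(len(hashtag) + 1))]
--     possible_split_positions = [i for i, x in enumerate(split_possibility) if x is True]
--
--     for split_pos in possible_split_positions:
--         split_words = []
--         word_1, word_2 = hashtag[:len(hashtag) - split_pos], hashtag[len(hashtag) - split_pos:]
--
--         if word_2 in word_dictionary: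
--             split_words.append(word_1)
--             split_words.append(word_2)
--             all_possibilities.append(split_words)
--
--             another_round = split_hashtag_to_words_all_possibilities(word_2, word_dictionary)
--
--             if len(another_round) > 0:
--                 all_possibilities = all_possibilities + [[a1] + a2 for a1, a2, in
--                                                          zip([word_1] * len(another_round), another_round)]
--         else:
--             another_round = split_hashtag_to_words_all_possibilities(word_2, word_dictionary)
--
--             if len(another_round) > 0:
--                 all_possibilities = all_possibilities + [[a1] + a2 for a1, a2, in
--                                                          zip([word_1] * len(another_round), another_round)]
--     return all_possibilities
-- ===== SOURCE B (Python) =====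
-- def split_hashtag_to_words_all_possibilities(hashtag, word_dictionary):
--     # Memoized DP over suffix start positions (word-break enumeration).
--     from functools import lru_cache
--     n = len(hashtag)
--     words = set(word_dictionary)
--
--     @lru_cache(maxsize=None)
--     def splits_from(j):
--         # all decompositions of hashtag[j:] into nonempty dictionary words,
--         # longer first piece first
--         if j >= n:
--             return [[]]
--         return [[hashtag[j:k]] + rest
--                 for k in range(n, j, -1)
--                 if hashtag[j:k] in words
--                 for rest in splits_from(k)]
--
--     return [[hashtag[:k]] + rest
--             for k in range(n - 1, 0, -1)
--             if hashtag[:k] in words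
--             for rest in splits_from(k)]
-- ===== Notes on version B (the rewrite author's own statement) =====
-- stated objective: alternative
-- what changed: A re-enumerates every suffix's splits with fresh exponential recursive calls that rebuild the whole split-possibility table each time; B is a memoized word-break enumeration (DP over suffix start positions, dictionary in a set) that computes each suffix's decompositions once.
import Mathlib
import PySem

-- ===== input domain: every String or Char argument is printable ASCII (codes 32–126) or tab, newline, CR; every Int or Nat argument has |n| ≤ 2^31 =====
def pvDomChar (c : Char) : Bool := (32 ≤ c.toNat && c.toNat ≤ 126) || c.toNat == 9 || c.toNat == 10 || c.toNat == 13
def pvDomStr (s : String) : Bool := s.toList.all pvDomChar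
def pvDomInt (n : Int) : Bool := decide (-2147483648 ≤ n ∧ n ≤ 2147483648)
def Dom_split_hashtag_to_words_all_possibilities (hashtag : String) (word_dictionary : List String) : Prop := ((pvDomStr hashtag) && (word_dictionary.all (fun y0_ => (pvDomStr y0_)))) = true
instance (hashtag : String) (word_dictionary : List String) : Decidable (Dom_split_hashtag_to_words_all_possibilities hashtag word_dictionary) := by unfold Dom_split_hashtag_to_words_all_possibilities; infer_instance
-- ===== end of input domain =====

-- B replaces A's repeated recursive re-exploration of suffixes by a memoized
-- word-break enumeration over suffix start positions (a different algorithm of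
-- the same result; equivalence proved under Pre_: '' not in the dictionary).

-- ===== PORT A =====
-- Literal port of A; the recursion is fueled (fuel = len+1 suffices: under Pre_
-- every recursive call is on a strictly shorter string, so fuel never runs out;
-- when '' ∈ word_dictionary the Python recursion never terminates — outside Pre_).
def pvAcore (fuel : Nat) (hashtag : String) (word_dictionary : List String) : List (List String) :=
  match fuel with
  | 0 => []
  | fuel + 1 =>
    let l := hashtag.toList
    let n := l.length
    -- split_possibility = [hashtag[:i] in word_dictionary for i in reversed(range(len(hashtag)+1))]
    let split_possibility : List Bool :=
      ((List.range (n + 1)).reverse).map (fun i => decide (String.ofList (l.take i) ∈ word_dictionary))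
    -- possible_split_positions = [i for i, x in enumerate(split_possibility) if x is True]
    -- (indices of a list are the natural numbers 0..n: zipIdx is exact for enumerate here)
    let possible_split_positions : List Nat :=
      ((split_possibility.zipIdx).filter (fun p => p.1)).map (fun p => p.2)
    possible_split_positions.foldl (fun all_possibilities split_pos =>
      let word_1 := String.ofList (l.take (n - split_pos))   -- hashtag[:len-split_pos]
      let word_2 := String.ofList (l.drop (n - split_pos))   -- hashtag[len-split_pos:]
      if word_2 ∈ word_dictionary then
        let all1 := all_possibilities ++ [[word_1, word_2]]
        let another_round := pvAcore fuel word_2 word_dictionary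
        if another_round.length > 0 then
          all1 ++ another_round.map (fun a2 => word_1 :: a2)   -- zip([word_1]*len(r), r)
        else all1
      else
        let another_round := pvAcore fuel word_2 word_dictionary
        if another_round.length > 0 then
          all_possibilities ++ another_round.map (fun a2 => word_1 :: a2)
        else all_possibilities) []

def split_hashtag_to_words_all_possibilities (hashtag : String) (word_dictionary : List String) : List (List String) :=
  pvAcore (hashtag.toList.length + 1) hashtag word_dictionary

-- ===== PORT B =====
-- splits_from(j) of Source B: all decompositions of hashtag[j:] into nonempty
-- dictionary words (longer first piece first); recursion on the suffix start.
def pvBsplits (l : List Char) (words : List String) (n : Nat) (j : Nat) : List (List String) :=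
  if h : j < n then
    -- for k in range(n, j, -1) …
    (((List.range' (j + 1) (n - j)).reverse).attach).flatMap (fun kh =>
      -- hashtag[j:k] (evaluated in the test and again in the result, as in Source B)
      if String.ofList ((l.drop j).take (kh.1 - j)) ∈ words then
        (pvBsplits l words n kh.1).map (fun rest => String.ofList ((l.drop j).take (kh.1 - j)) :: rest)
      else [])
  else [[]]
termination_by n - j
decreasing_by
  have hk := kh.2
  simp only [List.mem_reverse, List.mem_range'_1] at hk
  omega

def split_hashtag_to_words_all_possibilities_alt (hashtag : String) (word_dictionary : List String) : List (List String) :=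
  let l := hashtag.toList
  let n := l.length
  let words := PySem.Set.ofList word_dictionary
  -- [[hashtag[:k]] + rest for k in range(n-1, 0, -1) if hashtag[:k] in words for rest in splits_from(k)]
  ((List.range' 1 (n - 1)).reverse).flatMap (fun k =>
    if String.ofList (l.take k) ∈ words then
      (pvBsplits l words n k).map (fun rest => String.ofList (l.take k) :: rest)
    else [])


-- ===== PRECONDITION & SPEC =====
-- Pre_ excludes dictionaries containing the empty string: there Python A recurses
-- forever on the unchanged hashtag and dies with RecursionError (it never returns).
def Pre_split_hashtag_to_words_all_possibilities (hashtag : String) (word_dictionary : List String) : Prop :=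
  "" ∉ word_dictionary
instance (hashtag : String) (word_dictionary : List String) : Decidable (Pre_split_hashtag_to_words_all_possibilities hashtag word_dictionary) := by unfold Pre_split_hashtag_to_words_all_possibilities; infer_instance

def pvWitness_split_hashtag_to_words_all_possibilities : String × List String :=
  ("abc", ["a", "b", "c", "bc"])

def Spec_split_hashtag_to_words_all_possibilities (hashtag : String) (word_dictionary : List String) (out : List (List String)) : Prop := out = split_hashtag_to_words_all_possibilities_alt hashtag word_dictionary
instance (hashtag : String) (word_dictionary : List String) (out : List (List String)) : Decidable (Spec_split_hashtag_to_words_all_possibilities hashtag word_dictionary out) := by unfold Spec_split_hashtag_to_words_all_possibilities; infer_instance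

-- ===== CLAIM (what is proved, stated in full; the proofs are below) =====
def Claim_equal_split_hashtag_to_words_all_possibilities : Prop := ∀ (hashtag : String) (word_dictionary : List String), Dom_split_hashtag_to_words_all_possibilities hashtag word_dictionary → Pre_split_hashtag_to_words_all_possibilities hashtag word_dictionary → Spec_split_hashtag_to_words_all_possibilities hashtag word_dictionary (split_hashtag_to_words_all_possibilities hashtag word_dictionary)

-- ===== LEMMAS AND PROOFS =====

theorem pv_flatMap_filter {α β : Type} (p : α → Bool) (g : α → List β) (l : List α) :
    (l.filter p).flatMap g = l.flatMap (fun x => if p x then g x else []) := by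
  induction l with
  | nil => simp
  | cons x xs ih =>
    by_cases h : p x <;> simp [List.filter_cons, h, ih]

theorem pv_flatMap_congr_mem {α β : Type} {l : List α} {f g : α → List β}
    (h : ∀ x ∈ l, f x = g x) : l.flatMap f = l.flatMap g := by
  induction l with
  | nil => rfl
  | cons x xs ih => simp [List.flatMap_cons, h x (by simp), ih (fun y hy => h y (by simp [hy]))]

theorem pv_posGen {α : Type} (P : α → Bool) : ∀ (xs : List α) (s : Nat),
    ((((xs.map P).zipIdx s).filter (fun p => p.1)).map (fun p => p.2)) =
      (((xs.zipIdx s).filter (fun p => P p.1)).map (fun p => p.2)) := by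
  intro xs
  induction xs with
  | nil => simp
  | cons x xs ih =>
    intro s
    by_cases h : P x <;> simp [List.zipIdx_cons, List.filter_cons, h, ih (s+1)]

theorem pv_zipIdx_reverse_range (m : Nat) :
    ((List.range m).reverse).zipIdx = (List.range m).map (fun j => (m - 1 - j, j)) := by
  apply List.ext_getElem <;> simp [List.getElem_zipIdx]

theorem pv_range'_shift (a q d : Nat) :
    List.range' (a + d) q = (List.range' a q).map (fun x => x + d) := by
  rw [List.range'_eq_map_range, List.range'_eq_map_range, List.map_map]
  apply List.map_congr_left
  intro i _
  simp; omega

theorem pv_rev_range_sub (n : Nat) :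
    (List.range' 1 (n - 1)).reverse = (List.range' 1 (n - 1)).map (fun j => n - j) := by
  apply List.ext_getElem
  · simp
  · intro i h1 h2
    simp at h1 ⊢
    omega

theorem pvBsplits_stop (l : List Char) (words : List String) (n j : Nat) (h : ¬ j < n) :
    pvBsplits l words n j = [[]] := by
  rw [pvBsplits, dif_neg h]

theorem pvBsplits_eq_flatMap (l : List Char) (words : List String) (n j : Nat) (h : j < n) :
    pvBsplits l words n j = ((List.range' (j + 1) (n - j)).reverse).flatMap (fun k =>
      if String.ofList ((l.drop j).take (k - j)) ∈ words then
        (pvBsplits l words n k).map (fun rest => String.ofList ((l.drop j).take (k - j)) :: rest)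
      else []) := by
  rw [pvBsplits, dif_pos h]
  conv_rhs => rw [show (List.range' (j + 1) (n - j)).reverse
      = ((List.range' (j + 1) (n - j)).reverse).attach.map Subtype.val
    from (List.attach_map_subtype_val _).symm, List.flatMap_map]

theorem pv_positions (l : List Char) (wd : List String) :
    (((((List.range (l.length + 1)).reverse).map (fun i => decide (String.ofList (l.take i) ∈ wd))).zipIdx.filter (fun p => p.1)).map (fun p => p.2)) =
      (List.range (l.length + 1)).filter (fun j => decide (String.ofList (l.take (l.length - j)) ∈ wd)) := by
  rw [pv_posGen, pv_zipIdx_reverse_range, List.filter_map, List.map_map]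
  have h2 : ((fun (p : Nat × Nat) => p.2) ∘ (fun j => (l.length + 1 - 1 - j, j))) = id := rfl
  rw [h2, List.map_id]
  rfl

theorem pvAcore_nil (wd : List String) (hP : "" ∉ wd) (fuel : Nat) :
    pvAcore fuel (String.ofList []) wd = [] := by
  cases fuel with
  | zero => rfl
  | succ fuel => simp [pvAcore, List.range_one, hP]

theorem pv_shift (l : List Char) (words : List String) :
    ∀ (m d j : Nat), d ≤ j → l.length - j ≤ m →
      pvBsplits l words l.length j = pvBsplits (l.drop d) words (l.length - d) (j - d) := by
  intro m
  induction m with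
  | zero =>
    intro d j hdj hm
    rw [pvBsplits_stop _ _ _ _ (by omega), pvBsplits_stop _ _ _ _ (by omega)]
  | succ m ih =>
    intro d j hdj hm
    by_cases hj : j < l.length
    · rw [pvBsplits_eq_flatMap _ _ _ _ hj,
        pvBsplits_eq_flatMap _ _ _ _ (show j - d < l.length - d by omega)]
      have hq : l.length - d - (j - d) = l.length - j := by omega
      rw [hq]
      have hrange : List.range' (j + 1) (l.length - j) =
          (List.range' (j - d + 1) (l.length - j)).map (fun x => x + d) := by
        rw [← pv_range'_shift]; congr 1; omega
      rw [hrange, ← List.map_reverse, List.flatMap_map]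
      apply pv_flatMap_congr_mem
      intro k hk
      simp only [List.mem_reverse, List.mem_range'_1] at hk
      have h1 : k + d - j = k - (j - d) := by omega
      have h2 : (l.drop d).drop (j - d) = l.drop j := by
        rw [List.drop_drop]; congr 1; omega
      have h3 : pvBsplits l words l.length (k + d) =
          pvBsplits (l.drop d) words (l.length - d) (k + d - d) :=
        ih d (k + d) (by omega) (by omega)
      have h4 : k + d - d = k := by omega
      rw [h4] at h3
      rw [h1, h2, h3]
    · rw [pvBsplits_stop _ _ _ _ hj, pvBsplits_stop _ _ _ _ (by omega)]

def pvAltBody (t : List Char) (words : List String) : List (List String) :=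
  ((List.range' 1 (t.length - 1)).reverse).flatMap (fun k =>
    if String.ofList (t.take k) ∈ words then
      (pvBsplits t words t.length k).map (fun rest => String.ofList (t.take k) :: rest)
    else [])

theorem pvAltBody_eq (t : List Char) (wd : List String) :
    split_hashtag_to_words_all_possibilities_alt (String.ofList t) wd = pvAltBody t (PySem.Set.ofList wd) := by
  simp [split_hashtag_to_words_all_possibilities_alt, pvAltBody]


theorem pv_gchar (l : List Char) (words : List String) (k : Nat) (hk0 : 0 < k) (hkn : k < l.length) :
    pvBsplits l words l.length k =
      (if String.ofList (l.drop k) ∈ words then [[String.ofList (l.drop k)]] else []) ++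
        pvAltBody (l.drop k) words := by
  rw [pvBsplits_eq_flatMap _ _ _ _ hkn]
  have hsplit : List.range' (k + 1) (l.length - k) =
      List.range' (k + 1) (l.length - k - 1) ++ [l.length] := by
    have h1 : l.length - k = (l.length - k - 1) + 1 := by omega
    rw [h1]
    have := List.range'_concat (s := k + 1) (n := l.length - k - 1) (step := 1)
    simpa [show k + 1 + (l.length - k - 1) = l.length by omega] using this
  rw [hsplit, List.reverse_append, List.reverse_singleton, List.singleton_append,
    List.flatMap_cons]
  congr 1
  · -- head term: k' = l.length
    have ht : (l.drop k).take (l.length - k) = l.drop k := by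
      apply List.take_of_length_le; simp
    rw [ht, pvBsplits_stop _ _ _ _ (by omega)]
    by_cases hc : String.ofList (l.drop k) ∈ words <;> simp [hc]
  · -- tail: reindex k' = k'' + k
    unfold pvAltBody
    have hlen : (l.drop k).length - 1 = l.length - k - 1 := by simp
    rw [hlen]
    have hrange : List.range' (k + 1) (l.length - k - 1) =
        (List.range' 1 (l.length - k - 1)).map (fun x => x + k) := by
      rw [← pv_range'_shift]; congr 1; omega
    rw [hrange, ← List.map_reverse, List.flatMap_map]
    apply pv_flatMap_congr_mem
    intro x hx
    simp only [List.mem_reverse, List.mem_range'_1] at hx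
    have h1 : x + k - k = x := by omega
    have h3 : pvBsplits l words l.length (x + k) =
        pvBsplits (l.drop k) words (l.length - k) (x + k - k) :=
      pv_shift l words l.length k (x + k) (by omega) (by omega)
    rw [h1] at h3
    simp only [List.length_drop]
    rw [h1, h3]

theorem pv_foldA {β : Type} (P : Nat → Prop) [DecidablePred P] (pair : Nat → List β)
    (ar : Nat → List (List β)) (mp : Nat → List β → List β) :
    ∀ (pos : List Nat) (acc : List (List β)),
      pos.foldl (fun acc j =>
        if P j then
          (if (ar j).length > 0 then (acc ++ [pair j]) ++ (ar j).map (mp j) else acc ++ [pair j])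
        else
          (if (ar j).length > 0 then acc ++ (ar j).map (mp j) else acc)) acc
      = acc ++ pos.flatMap (fun j => (if P j then [pair j] else []) ++ (ar j).map (mp j)) := by
  intro pos
  induction pos with
  | nil => intro acc; simp
  | cons x xs ih =>
    intro acc
    rw [List.foldl_cons, ih, List.flatMap_cons]
    by_cases hp : P x <;> cases har : ar x <;> simp [hp, har, List.append_assoc]

theorem pv_main (wd : List String) (hP : "" ∉ wd) :
    ∀ (fuel : Nat) (l : List Char), l.length < fuel →
      pvAcore fuel (String.ofList l) wd = split_hashtag_to_words_all_possibilities_alt (String.ofList l) wd := by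
  intro fuel
  induction fuel with
  | zero => intro l h; omega
  | succ fuel ih =>
    intro l hlen
    rw [pvAltBody_eq]
    simp only [pvAcore, String.toList_ofList]
    rw [pv_positions]
    refine Eq.trans (pv_foldA (fun j => String.ofList (l.drop (l.length - j)) ∈ wd)
      (fun j => [String.ofList (l.take (l.length - j)), String.ofList (l.drop (l.length - j))])
      (fun j => pvAcore fuel (String.ofList (l.drop (l.length - j))) wd)
      (fun j a2 => String.ofList (l.take (l.length - j)) :: a2) _ []) ?_
    rw [List.nil_append, pv_flatMap_filter]
    by_cases hn : l.length = 0
    · have hl : l = [] := List.length_eq_zero_iff.mp hn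
      subst hl
      simp [pvAltBody, pvAcore_nil wd hP, hP, List.range_one]
    · have hrange : List.range (l.length + 1) =
          0 :: (List.range' 1 (l.length - 1) ++ [l.length]) := by
        rw [List.range_eq_range', List.range'_succ]
        congr 1
        have h2 := List.range'_concat (s := 1) (n := l.length - 1) (step := 1)
        rw [show (l.length - 1) + 1 = l.length by omega] at h2
        rw [h2]
        congr 2
        omega
      rw [hrange, List.flatMap_cons, List.flatMap_append, List.flatMap_singleton]
      have hterm0 : (if decide (String.ofList (l.take (l.length - 0)) ∈ wd) = true then
          (if String.ofList (l.drop (l.length - 0)) ∈ wd then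
            [[String.ofList (l.take (l.length - 0)), String.ofList (l.drop (l.length - 0))]] else []) ++
          (pvAcore fuel (String.ofList (l.drop (l.length - 0))) wd).map
            (fun a2 => String.ofList (l.take (l.length - 0)) :: a2)
        else []) = [] := by
        simp [List.drop_length, hP, pvAcore_nil wd hP]
      rw [hterm0]
      have htermn : (if decide (String.ofList (l.take (l.length - l.length)) ∈ wd) = true then
          (if String.ofList (l.drop (l.length - l.length)) ∈ wd then
            [[String.ofList (l.take (l.length - l.length)), String.ofList (l.drop (l.length - l.length))]] else []) ++
          (pvAcore fuel (String.ofList (l.drop (l.length - l.length))) wd).map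
            (fun a2 => String.ofList (l.take (l.length - l.length)) :: a2)
        else []) = [] := by
        simp [Nat.sub_self, hP]
      rw [htermn, List.nil_append, List.append_nil]
      unfold pvAltBody
      rw [pv_rev_range_sub l.length, List.flatMap_map]
      apply pv_flatMap_congr_mem
      intro j hj
      simp only [List.mem_range'_1] at hj
      have hk0 : 0 < l.length - j := by omega
      have hkn : l.length - j < l.length := by omega
      rw [pv_gchar l _ (l.length - j) hk0 hkn]
      have hIH := ih (l.drop (l.length - j)) (by simp; omega)
      rw [pvAltBody_eq] at hIH
      rw [hIH]
      simp only [decide_eq_true_eq, PySem.Set.mem_ofList, List.length_drop]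
      by_cases hc : String.ofList (l.take (l.length - j)) ∈ wd
      · rw [if_pos hc, if_pos hc, List.map_append, apply_ite (List.map (fun rest => String.ofList (l.take (l.length - j)) :: rest))]
        simp
      · rw [if_neg hc, if_neg hc]

-- ===== VERDICT (by name: the statement is the Claim_ definition above) =====
theorem split_hashtag_to_words_all_possibilities_spec : Claim_equal_split_hashtag_to_words_all_possibilities := by
  intro hashtag wd _ hPre
  unfold Spec_split_hashtag_to_words_all_possibilities
  have h := pv_main wd hPre (hashtag.toList.length + 1) hashtag.toList (by omega)
  rw [String.ofList_toList] at h
  exact h
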